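-- pv_equiv track=rewrite | github.com/lefoulkrod/computron_9000 | tests/integrations/fixtures/fake_email.py | _parse_imap_arg
-- ===== SOURCE A (Python) =====
-- class _ImapParseError(Exception):
--     """Raised when an IMAP arg can't be parsed; the handler turns this into a BAD reply."""
--
-- def _parse_imap_arg(rest: str) -> tuple[str, str]:
--     r"""Parse one IMAP arg (quoted string or atom) from ``rest``.
--
--     Returns ``(value, leftover)``. The leftover is the remaining text
--     after the arg with any leading whitespace stripped. A quoted form
--     like ``"Sent Messages" something`` returns ``("Sent Messages", "something")``;
--     an unquoted form like ``Sent Messages`` returns ``("Sent", "Messages")``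
--     so the caller can detect the trailing-token-was-not-empty case and
--     respond ``BAD`` (mirrors what real iCloud/Gmail do for unquoted
--     multi-token folder names).
--
--     Raises :class:`_ImapParseError` on a quoted string that never closes.
--     """
--     rest = rest.lstrip()
--     if not rest:
--         raise _ImapParseError("missing argument")
--     if rest.startswith('"'):
--         out: list[str] = []
--         i = 1
--         while i < len(rest):
--             c = rest[i]
--             if c == "\\" and i + 1 < len(rest):
--                 out.append(rest[i + 1])
--                 i += 2
--                 continue
--             if c == '"':
--                 return "".join(out), rest[i + 1:].lstrip()
--             out.append(c)
--             i += 1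
--         raise _ImapParseError("unterminated quoted string")
--     head, _, tail = rest.partition(" ")
--     return head, tail.lstrip()
-- ===== SOURCE B (Python) =====
-- class _ImapParseError(Exception):
--     """Raised when an IMAP arg can't be parsed; the handler turns this into a BAD reply."""
--
-- def _parse_imap_arg(rest: str) -> tuple[str, str]:
--     """Parse one IMAP arg (quoted string or atom) from ``rest``.
--
--     Segment-scanning variant: in the quoted branch, instead of walking one
--     character at a time, locate the next backslash/quote with str.find and
--     copy whole plain runs at once.
--     """
--     rest = rest.lstrip()
--     if not rest:
--         raise _ImapParseError("missing argument")
--     if rest.startswith('"'):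
--         out: list[str] = []
--         body = rest[1:]
--         while body:
--             jb = body.find("\\")
--             jq = body.find('"')
--             if jq < 0:
--                 break
--             if 0 <= jb < jq:
--                 out.append(body[:jb])
--                 out.append(body[jb + 1])
--                 body = body[jb + 2:]
--             else:
--                 out.append(body[:jq])
--                 return "".join(out), body[jq + 1:].lstrip()
--         raise _ImapParseError("unterminated quoted string")
--     head, _, tail = rest.partition(" ")
--     return head, tail.lstrip()
-- ===== Notes on version B (the rewrite author's own statement) =====
-- stated objective: alternative
-- what changed: The quoted-string branch no longer walks one character at a time; it repeatedly locates the next backslash/quote with str.find and copies whole plain runs at once, slicing off the consumed prefix; the unquoted lstrip/partition branch is unchanged.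
import Mathlib
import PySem

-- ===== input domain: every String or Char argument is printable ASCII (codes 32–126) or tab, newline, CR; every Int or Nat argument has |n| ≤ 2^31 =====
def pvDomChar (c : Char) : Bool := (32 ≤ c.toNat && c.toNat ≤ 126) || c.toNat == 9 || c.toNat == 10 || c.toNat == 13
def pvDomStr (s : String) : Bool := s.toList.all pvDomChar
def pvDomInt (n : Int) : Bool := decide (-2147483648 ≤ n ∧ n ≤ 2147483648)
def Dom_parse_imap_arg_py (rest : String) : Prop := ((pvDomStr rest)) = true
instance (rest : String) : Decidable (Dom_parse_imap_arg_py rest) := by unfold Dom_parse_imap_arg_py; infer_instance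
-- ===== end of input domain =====

-- B replaces A's one-character-at-a-time walk of the quoted string by a segment scan
-- driven by str.find (copying whole plain runs at once); objective: alternative decomposition.
-- Where Python A raises _ImapParseError (excluded by Pre_) both ports return ("", "").

-- ===== PORT A =====
-- rest.partition(" "): exact hand port for the single-character separator " "
def pvPartitionSpace (s : List Char) : List Char × List Char :=
  (s.takeWhile (fun c => c ≠ ' '), (s.dropWhile (fun c => c ≠ ' ')).drop 1)

-- A's while loop over rest[i], i ≥ 1, written on the suffix it still has to read;
-- `out` is the list of appended characters ("".join(out) is their String).
-- none = the loop ran off the end (Python raises "unterminated quoted string").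
def pvALoop (out : List Char) (s : List Char) : Option (List Char × List Char) :=
  match s with
  | [] => none
  | c :: cs =>
    -- c == "\\" and i + 1 < len(rest): append rest[i+1] (= head of cs), i += 2
    if c = '\\' ∧ cs ≠ [] then pvALoop (out ++ [cs.headD ' ']) cs.tail
    else if c = '"' then some (out, PySem.Chars.lstrip cs)
    else pvALoop (out ++ [c]) cs
termination_by s.length
decreasing_by
  · simp [List.length_tail]
  · simp

def parse_imap_arg_py (rest : String) : String × String :=
  let s := PySem.Chars.lstrip rest.toList
  if s = [] then ("", "")                       -- Python raises _ImapParseError (outside Pre_)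
  else if PySem.Chars.startswith s ['"'] then
    match pvALoop [] s.tail with
    | some (v, left) => (String.ofList v, String.ofList left)
    | none => ("", "")                          -- Python raises _ImapParseError (outside Pre_)
  else
    let p := pvPartitionSpace s
    (String.ofList p.1, String.ofList (PySem.Chars.lstrip p.2))

-- ===== PORT B =====
-- B's while loop over the remaining `body` (= a suffix of the quoted part):
-- out.append(body[:jb]); out.append(body[jb+1]) is flattened into the char accumulator
-- (Python joins the segments with "".join at the end); body[jb+1] is always in range
-- since jb < jq < len(body), so List.getD is exact there.
def pvBLoop (out : List Char) (body : List Char) : Option (List Char × List Char) :=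
  if body = [] then none
  else
    let jb := PySem.Chars.find body ['\\']
    let jq := PySem.Chars.find body ['"']
    if jq < 0 then none
    else if 0 ≤ jb ∧ jb < jq then
      pvBLoop (out ++ body.take jb.toNat ++ [body.getD (jb.toNat + 1) ' ']) (body.drop (jb.toNat + 2))
    else
      some (out ++ body.take jq.toNat, PySem.Chars.lstrip (body.drop (jq.toNat + 1)))
termination_by body.length
decreasing_by
  rename_i h _ _
  have : body.length ≠ 0 := by simpa [List.length_eq_zero_iff] using h
  simp [List.length_drop]; omega

def parse_imap_arg_py_alt (rest : String) : String × String :=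
  let s := PySem.Chars.lstrip rest.toList
  if s = [] then ("", "")                       -- Python raises _ImapParseError (outside Pre_)
  else if PySem.Chars.startswith s ['"'] then
    match pvBLoop [] s.tail with
    | some (v, left) => (String.ofList v, String.ofList left)
    | none => ("", "")                          -- Python raises _ImapParseError (outside Pre_)
  else
    let p := pvPartitionSpace s
    (String.ofList p.1, String.ofList (PySem.Chars.lstrip p.2))

-- ===== PRECONDITION & SPEC =====
-- Pre_ excludes exactly the inputs on which Python A raises _ImapParseError:
-- an all-whitespace/empty argument, and a quoted string that never closes.
-- pvCloses: the quoted body (after the opening '"') contains a closing quote,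
-- reading a backslash-with-a-following-char as an escape pair.
def pvCloses : List Char → Bool
  | [] => false
  | '\\' :: _ :: cs => pvCloses cs
  | '"' :: _ => true
  | _ :: cs => pvCloses cs

def Pre_parse_imap_arg_py (rest : String) : Prop :=
  let s := PySem.Chars.lstrip rest.toList
  s ≠ [] ∧ (s.head? = some '"' → pvCloses s.tail = true)
instance (rest : String) : Decidable (Pre_parse_imap_arg_py rest) := by
  unfold Pre_parse_imap_arg_py; infer_instance

def pvWitness_parse_imap_arg_py : String := "\"a b\"  c"

def Spec_parse_imap_arg_py (rest : String) (out : String × String) : Prop := out = parse_imap_arg_py_alt rest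
instance (rest : String) (out : String × String) : Decidable (Spec_parse_imap_arg_py rest out) := by unfold Spec_parse_imap_arg_py; infer_instance

-- ===== CLAIM (what is proved, stated in full; the proofs are below) =====
def Claim_equal_parse_imap_arg_py : Prop := ∀ (rest : String), Dom_parse_imap_arg_py rest → Pre_parse_imap_arg_py rest → Spec_parse_imap_arg_py rest (parse_imap_arg_py rest)

-- ===== LEMMAS AND PROOFS =====

theorem pv_prefix_singleton {x : Char} {l : List Char} : [x] <+: l ↔ ∃ t, l = x :: t := by
  constructor
  · rintro ⟨t, rfl⟩; exact ⟨t, rfl⟩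
  · rintro ⟨t, rfl⟩; exact ⟨t, rfl⟩

theorem pv_infix_singleton {x : Char} {l : List Char} : [x] <:+: l ↔ x ∈ l := by
  constructor
  · intro h; exact h.subset (by simp)
  · intro h
    obtain ⟨s, t, rfl⟩ := List.append_of_mem h
    exact ⟨s, t, by simp⟩

theorem pv_find_singleton_neg_iff (l : List Char) (x : Char) :
    PySem.Chars.find l [x] = -1 ↔ x ∉ l := by
  rw [PySem.Chars.find_eq_neg_one_iff, pv_infix_singleton]

theorem pv_find_cons_self (c : Char) (cs : List Char) :
    PySem.Chars.find (c :: cs) [c] = 0 := by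
  have hn : 0 ≤ PySem.Chars.find (c :: cs) [c] := by
    rw [PySem.Chars.find_nonneg_iff, pv_infix_singleton]; simp
  obtain ⟨hpre, hmin⟩ := PySem.Chars.find_spec hn
  by_contra hne
  have h0 : (0:ℕ) < (PySem.Chars.find (c :: cs) [c]).toNat := by omega
  exact hmin 0 h0 ⟨cs, rfl⟩

theorem pv_find_cons_ne (c x : Char) (cs : List Char) (hne : c ≠ x) :
    PySem.Chars.find (c :: cs) [x] =
      if PySem.Chars.find cs [x] = -1 then -1 else PySem.Chars.find cs [x] + 1 := by
  by_cases h : PySem.Chars.find cs [x] = -1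
  · simp only [h, if_pos]
    rw [pv_find_singleton_neg_iff] at h ⊢
    simp [hne.symm, h]
  · simp only [h, if_false]
    have hk : 0 ≤ PySem.Chars.find cs [x] := by
      have := PySem.Chars.neg_one_le_find cs [x]; omega
    obtain ⟨hkp, hkmin⟩ := PySem.Chars.find_spec hk
    have hm : 0 ≤ PySem.Chars.find (c :: cs) [x] := by
      rw [PySem.Chars.find_nonneg_iff, pv_infix_singleton]
      rw [PySem.Chars.find_nonneg_iff, pv_infix_singleton] at hk
      exact List.mem_cons_of_mem _ hk
    obtain ⟨hmp, hmmin⟩ := PySem.Chars.find_spec hm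
    set m := PySem.Chars.find (c :: cs) [x] with hmdef
    set k := PySem.Chars.find cs [x] with hkdef
    have hm0 : m.toNat ≠ 0 := by
      intro h0
      rw [h0] at hmp
      obtain ⟨t, ht⟩ := pv_prefix_singleton.mp hmp
      have hcx : c = x := by simpa using congrArg List.head? ht
      exact hne hcx
    have hle : m.toNat ≤ k.toNat + 1 := by
      by_contra hgt
      exact hmmin (k.toNat + 1) (by omega) (by simpa using hkp)
    have hge : k.toNat + 1 ≤ m.toNat := by
      by_contra hlt
      have : [x] <+: cs.drop (m.toNat - 1) := by
        have : (c :: cs).drop m.toNat = cs.drop (m.toNat - 1) := by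
          have : m.toNat = (m.toNat - 1) + 1 := by omega
          rw [this]; simp
        rwa [this] at hmp
      exact hkmin (m.toNat - 1) (by omega) this
    omega

-- A never returns if the remaining quoted body contains no quote at all
theorem pvALoop_no_quote (s : List Char) : '"' ∉ s → ∀ out, pvALoop out s = none := by
  induction hn : s.length using Nat.strong_induction_on generalizing s with
  | _ n ih =>
  intro hqn out
  match s with
  | [] => rw [pvALoop]
  | c :: cs =>
    rw [pvALoop]
    by_cases hesc : c = '\\' ∧ cs ≠ []
    · rw [if_pos hesc]
      exact ih cs.tail.length (by simp at hn ⊢; omega) cs.tail rfl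
        (fun hm => hqn (List.mem_cons_of_mem _ (List.mem_of_mem_tail hm))) _
    · rw [if_neg hesc, if_neg (fun h => hqn (by simp [h]))]
      exact ih cs.length (by simp at hn; omega) cs rfl
        (fun hm => hqn (List.mem_cons_of_mem _ hm)) _

-- One B step on an ordinary leading character just moves it into the accumulator
theorem pvBLoop_shift (c : Char) (cs out : List Char)
    (hb : c ≠ '\\') (hq : c ≠ '"') :
    pvBLoop out (c :: cs) = pvBLoop (out ++ [c]) cs := by
  have hbm := PySem.Chars.neg_one_le_find cs ['\\']
  have hqm := PySem.Chars.neg_one_le_find cs ['"']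
  conv_lhs => rw [pvBLoop]
  rw [pv_find_cons_ne c '"' cs hq, pv_find_cons_ne c '\\' cs hb]
  by_cases hcq : PySem.Chars.find cs ['"'] = -1
  · -- no closing quote anywhere: both sides return none
    conv_rhs => rw [pvBLoop]
    rcases eq_or_ne cs [] with rfl | hne
    · simp [hcq]
    · simp [hcq, hne]
  · have hkq : 0 ≤ PySem.Chars.find cs ['"'] := by omega
    have hcsne : cs ≠ [] :=
      List.ne_nil_of_mem (pv_infix_singleton.mp ((PySem.Chars.find_nonneg_iff _ _).mp hkq))
    conv_rhs => rw [pvBLoop]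
    have hq1 : ¬(PySem.Chars.find cs ['"'] + 1 < 0) := by omega
    have hq2 : ¬(PySem.Chars.find cs ['"'] < 0) := by omega
    have htq : (PySem.Chars.find cs ['"'] + 1).toNat = (PySem.Chars.find cs ['"']).toNat + 1 := by
      omega
    by_cases hcb : PySem.Chars.find cs ['\\'] = -1
    · -- no escape: both take the closing-quote branch
      simp [hcq, hcb, hcsne, hq1, hq2, htq, List.append_assoc]
    · have hkb : 0 ≤ PySem.Chars.find cs ['\\'] := by omega
      have htb : (PySem.Chars.find cs ['\\'] + 1).toNat = (PySem.Chars.find cs ['\\']).toNat + 1 := by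
        omega
      by_cases hlt : PySem.Chars.find cs ['\\'] < PySem.Chars.find cs ['"']
      · -- escape first: both recurse on the tail past the escaped character
        have hc1 : (0:ℤ) ≤ PySem.Chars.find cs ['\\'] + 1 ∧
            PySem.Chars.find cs ['\\'] + 1 < PySem.Chars.find cs ['"'] + 1 := ⟨by omega, by omega⟩
        have hc2 : (0:ℤ) ≤ PySem.Chars.find cs ['\\'] ∧
            PySem.Chars.find cs ['\\'] < PySem.Chars.find cs ['"'] := ⟨hkb, hlt⟩
        simp [hcq, hcb, hcsne, hq1, hq2, hc1, hc2, htb, List.append_assoc]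
      · -- closing quote first: both return
        have hc1 : ¬((0:ℤ) ≤ PySem.Chars.find cs ['\\'] + 1 ∧
            PySem.Chars.find cs ['\\'] + 1 < PySem.Chars.find cs ['"'] + 1) := by omega
        have hc2 : ¬((0:ℤ) ≤ PySem.Chars.find cs ['\\'] ∧
            PySem.Chars.find cs ['\\'] < PySem.Chars.find cs ['"']) := by omega
        simp [hcq, hcb, hcsne, hq1, hq2, hlt, htq, List.append_assoc]

-- The two quoted-string loops agree everywhere (both return none exactly where
-- Python raises "unterminated quoted string")
theorem pv_loop_eq (s : List Char) : ∀ out, pvBLoop out s = pvALoop out s := by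
  induction hn : s.length using Nat.strong_induction_on generalizing s with
  | _ n ih =>
  intro out
  match s with
  | [] => rw [pvBLoop, pvALoop]; simp
  | c :: cs =>
    by_cases hq : c = '"'
    · subst hq
      conv_lhs => rw [pvBLoop]
      rw [pv_find_cons_self]
      rw [pvALoop]
      have hno : ∀ x : ℤ, ¬(0 ≤ x ∧ x < 0) := by omega
      simp [hno]
    · by_cases hb : c = '\\'
      · subst hb
        conv_lhs => rw [pvBLoop]
        rw [pv_find_cons_self, pv_find_cons_ne '\\' '"' cs (by decide)]
        rw [pvALoop]
        have hqm := PySem.Chars.neg_one_le_find cs ['"']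
        by_cases hcq : PySem.Chars.find cs ['"'] = -1
        · rcases eq_or_ne cs [] with rfl | hne
          · simp [hcq, pvALoop]
          · rcases cs with _ | ⟨d, ds⟩
            · exact absurd rfl hne
            have hqn : '"' ∉ (d :: ds) := (pv_find_singleton_neg_iff _ _).mp hcq
            simp [hcq, pvALoop_no_quote ds (fun hm => hqn (List.mem_cons_of_mem _ hm))]
        · have hkq : 0 ≤ PySem.Chars.find cs ['"'] := by omega
          rcases cs with _ | ⟨d, ds⟩
          · exact absurd ((pv_find_singleton_neg_iff _ _).mpr (by simp)) hcq
          have h1 : ¬(PySem.Chars.find (d :: ds) ['"'] + 1 < 0) := by omega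
          have h2 : (0:ℤ) ≤ 0 ∧ (0:ℤ) < PySem.Chars.find (d :: ds) ['"'] + 1 :=
            ⟨le_refl _, by omega⟩
          simp [hcq, h1, h2]
          exact ih ds.length (by simp at hn; omega) ds rfl _
      · rw [pvBLoop_shift c cs out hb hq]
        rw [pvALoop]
        rw [if_neg (fun h => hb h.1), if_neg hq]
        exact ih cs.length (by simp at hn; omega) cs rfl _

-- ===== VERDICT (by name: the statement is the Claim_ definition above) =====
theorem parse_imap_arg_py_spec : Claim_equal_parse_imap_arg_py := by
  unfold Claim_equal_parse_imap_arg_py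
  intro rest _ _
  unfold Spec_parse_imap_arg_py parse_imap_arg_py parse_imap_arg_py_alt
  simp only [pv_loop_eq]
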